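-- pv_equiv track=rewrite | github.com/fangzhao2019/system_code-version2 | save_to_database/word_of_mouth/DiLiFenBu.py | getMapRepeatIndex
-- ===== SOURCE A (Python) =====
-- def getMapRepeatIndex(list, province, city):
--     i = -1
--     index = -1
--     for record in list:
--         i = i + 1
--         if province == record['province'] and city == record['city']:
--             index = i
--     return index
-- ===== SOURCE B (Python) =====
-- def getMapRepeatIndex(list, province, city):
--     for i in range(len(list) - 1, -1, -1):
--         record = list[i]
--         if record['province'] == province and record['city'] == city:
--             return i
--     return -1
-- ===== Notes on version B (the rewrite author's own statement) =====
-- stated objective: alternative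
-- what changed: Forward full scan with a last-match accumulator is replaced by a backward index scan (range(len-1,-1,-1)) that returns the first match immediately, with no accumulator.
import Mathlib
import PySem

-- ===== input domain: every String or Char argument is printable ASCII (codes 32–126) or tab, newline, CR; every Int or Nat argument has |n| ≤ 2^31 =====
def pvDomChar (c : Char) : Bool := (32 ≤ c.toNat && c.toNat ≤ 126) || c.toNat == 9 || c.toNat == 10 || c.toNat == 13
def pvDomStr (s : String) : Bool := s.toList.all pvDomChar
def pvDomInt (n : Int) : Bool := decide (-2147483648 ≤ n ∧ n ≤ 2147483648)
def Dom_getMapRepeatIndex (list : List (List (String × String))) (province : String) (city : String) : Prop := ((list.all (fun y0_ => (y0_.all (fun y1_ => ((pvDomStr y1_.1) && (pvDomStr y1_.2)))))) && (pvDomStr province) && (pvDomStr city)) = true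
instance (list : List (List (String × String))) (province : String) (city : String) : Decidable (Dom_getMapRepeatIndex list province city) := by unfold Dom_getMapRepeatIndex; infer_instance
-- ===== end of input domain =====

-- B replaces A's forward full scan with a last-match accumulator by a backward
-- index scan that returns the first match immediately (alternative decomposition, same cost).


-- ===== PORT A =====
-- A's condition 'province == record['province'] and city == record['city']'
-- (dict lookups totalized with getD ""; Pre_ guarantees the keys A evaluates exist)
def aCond (province city : String) (record : List (String × String)) : Bool :=
  (province == (PySem.Dict.mk record).getD "province" "") &&
  (city == (PySem.Dict.mk record).getD "city" "")

def aStep (province city : String) (st : Int × Int) (record : List (String × String)) : Int × Int :=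
  let i := st.1 + 1
  let index := if aCond province city record then i else st.2
  (i, index)

def getMapRepeatIndex (list : List (List (String × String))) (province : String) (city : String) : Int :=
  (list.foldl (aStep province city) (-1, -1)).2

-- ===== PORT B =====
-- B's condition 'record['province'] == province and record['city'] == city'
def bCond (province city : String) (record : List (String × String)) : Bool :=
  ((PySem.Dict.mk record).getD "province" "" == province) &&
  ((PySem.Dict.mk record).getD "city" "" == city)

def getMapRepeatIndex_alt (list : List (List (String × String))) (province : String) (city : String) : Int :=
  match (PySem.List.pyRange ((list.length : Int) - 1) (-1) (-1)).find?
      (fun i => bCond province city ((PySem.List.pyGet? list i).getD [])) with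
  | some i => i
  | none => -1

-- ===== PRECONDITION & SPEC =====
-- Pre_ excludes exactly the inputs where Python A raises KeyError: a record without key
-- "province", or a record whose "province" value equals province but lacks key "city".
def Pre_getMapRepeatIndex (list : List (List (String × String))) (province : String) (city : String) : Prop :=
  ∀ r ∈ list, ((PySem.Dict.mk r).get? "province").isSome = true ∧
    ((PySem.Dict.mk r).get? "province" = some province → ((PySem.Dict.mk r).get? "city").isSome = true)
instance (list : List (List (String × String))) (province : String) (city : String) : Decidable (Pre_getMapRepeatIndex list province city) := by unfold Pre_getMapRepeatIndex; infer_instance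

def pvWitness_getMapRepeatIndex : (List (List (String × String))) × String × String :=
  ([[("province", "p"), ("city", "c")]], "p", "c")

def Spec_getMapRepeatIndex (list : List (List (String × String))) (province : String) (city : String) (out : Int) : Prop := out = getMapRepeatIndex_alt list province city
instance (list : List (List (String × String))) (province : String) (city : String) (out : Int) : Decidable (Spec_getMapRepeatIndex list province city out) := by unfold Spec_getMapRepeatIndex; infer_instance

-- ===== CLAIM (what is proved, stated in full; the proofs are below) =====
def Claim_equal_getMapRepeatIndex : Prop := ∀ (list : List (List (String × String))) (province : String) (city : String), Dom_getMapRepeatIndex list province city → Pre_getMapRepeatIndex list province city → Spec_getMapRepeatIndex list province city (getMapRepeatIndex list province city)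

-- ===== LEMMAS AND PROOFS =====

lemma beq_comm_str (a b : String) : (a == b) = (b == a) := by
  cases h : a == b <;> cases h' : b == a <;> simp_all [beq_iff_eq]

lemma cond_eq (province city : String) (r : List (String × String)) :
    bCond province city r = aCond province city r := by
  unfold aCond bCond
  rw [beq_comm_str ((PySem.Dict.mk r).getD "province" "") province,
      beq_comm_str ((PySem.Dict.mk r).getD "city" "") city]

lemma aFold_fst (province city : String) (xs : List (List (String × String))) (s : Int × Int) :
    (xs.foldl (aStep province city) s).1 = s.1 + xs.length := by
  induction xs generalizing s with
  | nil => simp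
  | cons x xs ih => simp [aStep, ih]; omega

lemma A_concat (province city : String) (xs : List (List (String × String))) (x : List (String × String)) :
    getMapRepeatIndex (xs ++ [x]) province city =
      if aCond province city x then (xs.length : Int) else getMapRepeatIndex xs province city := by
  unfold getMapRepeatIndex
  rw [List.foldl_append]
  simp only [List.foldl_cons, List.foldl_nil, aStep]
  rw [aFold_fst]
  split <;> simp

lemma find?_congr_mem {l : List Int} {p q : Int → Bool} (h : ∀ i ∈ l, p i = q i) :
    l.find? p = l.find? q := by
  induction l with
  | nil => rfl
  | cons a l ih =>
    simp only [List.find?_cons]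
    rw [h a (List.mem_cons_self)]
    cases q a
    · exact ih (fun i hi => h i (List.mem_cons_of_mem a hi))
    · rfl

lemma pyGet?_append_lt (xs : List (List (String × String))) (x : List (String × String)) (i : Int)
    (h0 : 0 ≤ i) (h1 : i < xs.length) :
    PySem.List.pyGet? (xs ++ [x]) i = PySem.List.pyGet? xs i := by
  lift i to ℕ using h0 with n
  simp only [PySem.List.pyGet?_natCast]
  rw [List.getElem?_append_left (by exact_mod_cast h1)]

lemma B_concat (province city : String) (xs : List (List (String × String))) (x : List (String × String)) :
    getMapRepeatIndex_alt (xs ++ [x]) province city =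
      if bCond province city x then (xs.length : Int) else getMapRepeatIndex_alt xs province city := by
  unfold getMapRepeatIndex_alt
  have hlen : ((xs ++ [x]).length : Int) - 1 = (xs.length : Int) := by
    simp
  rw [hlen, PySem.List.pyRange_neg_one_cons (by omega : (-1 : Int) < (xs.length : Int))]
  have hcong : ∀ i ∈ PySem.List.pyRange ((xs.length : Int) - 1) (-1) (-1),
      (bCond province city ((PySem.List.pyGet? (xs ++ [x]) i).getD [])) =
      (bCond province city ((PySem.List.pyGet? xs i).getD [])) := by
    intro i hi
    rw [PySem.List.mem_pyRange_neg_one] at hi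
    rw [pyGet?_append_lt xs x i (by omega) (by omega)]
  cases hb : bCond province city x
  · rw [List.find?_cons_of_neg (by simp [hb])]
    rw [find?_congr_mem hcong]
    simp
  · rw [List.find?_cons_of_pos (by simp [hb])]
    simp

lemma main_eq (list : List (List (String × String))) (province city : String) :
    getMapRepeatIndex list province city = getMapRepeatIndex_alt list province city := by
  induction list using List.reverseRecOn with
  | nil =>
    unfold getMapRepeatIndex getMapRepeatIndex_alt
    simp [PySem.List.pyRange_neg_one_eq_nil (by omega : (-1 : Int) ≤ -1)]
  | append_singleton xs x ih =>
    rw [A_concat, B_concat, cond_eq, ih]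

-- ===== VERDICT (by name: the statement is the Claim_ definition above) =====
theorem getMapRepeatIndex_spec : Claim_equal_getMapRepeatIndex := by
  intro list province city _ _
  unfold Spec_getMapRepeatIndex
  exact main_eq list province city
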